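-- pv_equiv track=rewrite | github.com/Hsiangpo/OldironCrawler | src/oldironcrawler/extractor/protocol_discovery.py | _looks_like_named_detail_url
-- ===== SOURCE A (Python) =====
-- _DISCOVERY_PRIORITY_NEGATIVE_TOKENS = {
--     "article",
--     "articles",
--     "award",
--     "awards",
--     "blog",
--     "case",
--     "event",
--     "events",
--     "funds",
--     "insight",
--     "insights",
--     "journeys",
--     "news",
--     "post",
--     "posts",
--     "resource",
--     "resources",
--     "stories",
--     "story",
--     "update",
--     "updates",
-- }
--
-- _DISCOVERY_NAMED_DETAIL_CONTEXT_TOKENS = {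
--     "about",
--     "leadership",
--     "management",
--     "officers",
--     "our",
--     "people",
--     "profile",
--     "profiles",
--     "referral",
--     "referrals",
--     "team",
-- }
--
-- _DISCOVERY_NAMED_DETAIL_STOP_TOKENS = _DISCOVERY_NAMED_DETAIL_CONTEXT_TOKENS | {
--     "business",
--     "careers",
--     "charitable",
--     "company",
--     "corporate",
--     "culture",
--     "cultures",
--     "director",
--     "directors",
--     "executive",
--     "foundation",
--     "fund",
--     "funds",
--     "group",
--     "investment",
--     "investments",
--     "legal",
--     "office",
--     "our",
--     "people",
--     "planning",
--     "responsibility",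
--     "service",
--     "services",
--     "wealth",
-- }
--
-- def _looks_like_named_detail_url(tokens: list[str]) -> bool:
--     if len(tokens) < 3 or len(tokens) > 6:
--         return False
--     if not any(token in _DISCOVERY_NAMED_DETAIL_CONTEXT_TOKENS for token in tokens):
--         return False
--     name_tokens = [
--         token
--         for token in tokens
--         if token not in _DISCOVERY_NAMED_DETAIL_STOP_TOKENS and token not in _DISCOVERY_PRIORITY_NEGATIVE_TOKENS
--     ]
--     if len(name_tokens) < 2 or len(name_tokens) > 3:
--         return False
--     return all(token.isalpha() and len(token) >= 3 for token in name_tokens[:2])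
-- ===== SOURCE B (Python) =====
-- _DISCOVERY_PRIORITY_NEGATIVE_TOKENS = {
--     "article", "articles", "award", "awards", "blog", "case", "event",
--     "events", "funds", "insight", "insights", "journeys", "news", "post",
--     "posts", "resource", "resources", "stories", "story", "update", "updates",
-- }
--
-- _DISCOVERY_NAMED_DETAIL_CONTEXT_TOKENS = {
--     "about", "leadership", "management", "officers", "our", "people",
--     "profile", "profiles", "referral", "referrals", "team",
-- }
--
-- _DISCOVERY_NAMED_DETAIL_STOP_TOKENS = _DISCOVERY_NAMED_DETAIL_CONTEXT_TOKENS | {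
--     "business", "careers", "charitable", "company", "corporate", "culture",
--     "cultures", "director", "directors", "executive", "foundation", "fund",
--     "funds", "group", "investment", "investments", "legal", "office", "our",
--     "people", "planning", "responsibility", "service", "services", "wealth",
-- }
--
--
-- def _scan(rest, has_context, names):
--     # recursive short-circuit scan; `names` counts name tokens seen so far
--     if not rest:
--         return has_context and 2 <= names <= 3
--     token = rest[0]
--     if token in _DISCOVERY_NAMED_DETAIL_CONTEXT_TOKENS:
--         # context tokens are stop tokens, so they are never name tokens
--         return _scan(rest[1:], True, names)
--     if token in _DISCOVERY_NAMED_DETAIL_STOP_TOKENS or token in _DISCOVERY_PRIORITY_NEGATIVE_TOKENS: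
--         return _scan(rest[1:], has_context, names)
--     # a name token
--     if names >= 3:
--         return False  # prune: a fourth name token makes the answer False regardless
--     if names < 2 and not (token.isalpha() and len(token) >= 3):
--         return False  # prune: a bad token among the first two names is always fatal
--     return _scan(rest[1:], has_context, names + 1)
--
--
-- def _looks_like_named_detail_url(tokens: list[str]) -> bool:
--     if not 3 <= len(tokens) <= 6:
--         return False
--     return _scan(tokens, False, 0)
-- ===== Notes on version B (the rewrite author's own statement) =====
-- stated objective: alternative
-- what changed: Replaces A's staged pipeline (any-scan for context, filter comprehension materialising name_tokens, count guards, then an all-scan over its first two) by a recursive short-circuiting scanner that classifies each token in turn, exploits that context tokens are stop tokens (so they are never name tokens), validates the first two name tokens at the moment they are encountered, and returns False early as soon as a fourth name token or a bad leading name token appears; no intermediate list is built and there is no trailing all/any pass.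
import Mathlib
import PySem

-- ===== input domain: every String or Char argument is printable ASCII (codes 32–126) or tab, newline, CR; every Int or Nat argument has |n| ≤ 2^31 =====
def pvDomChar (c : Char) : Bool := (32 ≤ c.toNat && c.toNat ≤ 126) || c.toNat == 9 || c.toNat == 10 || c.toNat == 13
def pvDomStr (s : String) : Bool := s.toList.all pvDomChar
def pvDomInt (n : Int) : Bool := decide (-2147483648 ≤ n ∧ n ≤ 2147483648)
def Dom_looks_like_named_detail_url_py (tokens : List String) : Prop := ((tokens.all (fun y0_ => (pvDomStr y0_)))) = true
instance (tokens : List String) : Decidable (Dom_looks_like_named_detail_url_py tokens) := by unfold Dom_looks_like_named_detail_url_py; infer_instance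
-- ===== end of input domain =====

-- B replaces A's staged pipeline (any-scan, filter comprehension, count guards, all-scan) by a
-- recursive short-circuiting scanner with early-False pruning; same value on every input (alternative).


-- ===== PORT A =====
-- module constants: Python sets of string literals, built as PySem.Set
def pvNegTokens : PySem.Set String := PySem.Set.ofList
  ["article", "articles", "award", "awards", "blog", "case", "event",
   "events", "funds", "insight", "insights", "journeys", "news", "post",
   "posts", "resource", "resources", "stories", "story", "update", "updates"]

def pvCtxTokens : PySem.Set String := PySem.Set.ofList
  ["about", "leadership", "management", "officers", "our", "people",
   "profile", "profiles", "referral", "referrals", "team"]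

def pvStopTokens : PySem.Set String := PySem.Set.union pvCtxTokens
  (PySem.Set.ofList
    ["business", "careers", "charitable", "company", "corporate", "culture",
     "cultures", "director", "directors", "executive", "foundation", "fund",
     "funds", "group", "investment", "investments", "legal", "office", "our",
     "people", "planning", "responsibility", "service", "services", "wealth"])

def looks_like_named_detail_url_py (tokens : List String) : Bool :=
  if tokens.length < 3 || tokens.length > 6 then false
  else if !(tokens.any (fun token => PySem.Set.contains pvCtxTokens token)) then false
  else
    let name_tokens := tokens.filter (fun token =>
      !(PySem.Set.contains pvStopTokens token) && !(PySem.Set.contains pvNegTokens token))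
    if name_tokens.length < 2 || name_tokens.length > 3 then false
    else (PySem.List.slice name_tokens none (some 2)).all (fun token =>
      PySem.Str.strIsalpha token && decide (PySem.Str.len token ≥ 3))

-- ===== PORT B =====
-- recursive short-circuit scan; `names` counts name tokens seen so far
def pvScan (rest : List String) (has_context : Bool) (names : Nat) : Bool :=
  match rest with
  | [] => has_context && (decide (2 ≤ names) && decide (names ≤ 3))
  | token :: rest' =>
    if PySem.Set.contains pvCtxTokens token then
      -- context tokens are stop tokens, so they are never name tokens
      pvScan rest' true names
    else if PySem.Set.contains pvStopTokens token || PySem.Set.contains pvNegTokens token then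
      pvScan rest' has_context names
    else if names ≥ 3 then
      false  -- prune: a fourth name token makes the answer False regardless
    else if names < 2 && !(PySem.Str.strIsalpha token && decide (PySem.Str.len token ≥ 3)) then
      false  -- prune: a bad token among the first two names is always fatal
    else
      pvScan rest' has_context (names + 1)

def looks_like_named_detail_url_py_alt (tokens : List String) : Bool :=
  if !(3 ≤ tokens.length && tokens.length ≤ 6) then false
  else pvScan tokens false 0

-- ===== PRECONDITION & SPEC =====
def Spec_looks_like_named_detail_url_py (tokens : List String) (out : Bool) : Prop := out = looks_like_named_detail_url_py_alt tokens
instance (tokens : List String) (out : Bool) : Decidable (Spec_looks_like_named_detail_url_py tokens out) := by unfold Spec_looks_like_named_detail_url_py; infer_instance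

-- ===== CLAIM (what is proved, stated in full; the proofs are below) =====
def Claim_equal_looks_like_named_detail_url_py : Prop := ∀ (tokens : List String), Dom_looks_like_named_detail_url_py tokens → Spec_looks_like_named_detail_url_py tokens (looks_like_named_detail_url_py tokens)

-- ===== LEMMAS AND PROOFS =====
def pvIsName (token : String) : Bool :=
  !(PySem.Set.contains pvStopTokens token) && !(PySem.Set.contains pvNegTokens token)

def pvCheck (token : String) : Bool :=
  PySem.Str.strIsalpha token && decide (PySem.Str.len token ≥ 3)

-- context tokens are stop tokens (the stop set is built as ctx ∪ extras)
lemma pvCtx_subset_stop (t : String) (h : PySem.Set.contains pvCtxTokens t = true) :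
    PySem.Set.contains pvStopTokens t = true := by
  simp [pvCtxTokens, pvStopTokens, PySem.Set.contains, PySem.Set.union,
    PySem.Set.ofList, PySem.Set.add, PySem.Set.update] at *
  tauto

-- characterization of the scan in terms of A's three staged passes
lemma pvScan_char (rest : List String) (hc : Bool) (n : Nat) :
    pvScan rest hc n =
      ( (hc || rest.any (fun token => PySem.Set.contains pvCtxTokens token))
        && (decide (2 ≤ n + (rest.filter pvIsName).length)
            && decide (n + (rest.filter pvIsName).length ≤ 3))
        && ((rest.filter pvIsName).take (2 - n)).all pvCheck ) := by
  induction rest generalizing hc n with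
  | nil => simp [pvScan]
  | cons t ts ih =>
      by_cases hmemc : t ∈ pvCtxTokens
      · have hmems : t ∈ pvStopTokens := by
          have := pvCtx_subset_stop t (by simpa [PySem.Set.contains] using hmemc)
          simpa [PySem.Set.contains] using this
        have hname : pvIsName t = false := by
          simp [pvIsName]
          intro h'
          exact absurd hmems h'
        have hstep : pvScan (t :: ts) hc n = pvScan ts true n := by
          simp only [pvScan]
          simp [hmemc]
        rw [hstep, ih]
        simp [List.any_cons, hname, hmemc]
      · by_cases hskip : t ∈ pvStopTokens ∨ t ∈ pvNegTokens
        · have hname : pvIsName t = false := by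
            simp [pvIsName]
            intro h'
            rcases hskip with h | h
            · exact absurd h h'
            · exact h
          have hstep : pvScan (t :: ts) hc n = pvScan ts hc n := by
            simp only [pvScan]
            simp [hmemc, hskip]
          rw [hstep, ih]
          simp [List.any_cons, hname, hmemc]
        · rw [not_or] at hskip
          have hname : pvIsName t = true := by
            simp [pvIsName]
            exact hskip
          by_cases hn3 : n ≥ 3
          · have hLHS : pvScan (t :: ts) hc n = false := by
              simp only [pvScan]
              simp [hmemc, hskip, hn3]
            rw [hLHS]
            symm
            have hcount : decide (n + ((ts.filter pvIsName).length + 1) ≤ 3) = false := by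
              simp; omega
            simp [hname, hcount]
          · by_cases hck : pvCheck t = true
            · have hstep : pvScan (t :: ts) hc n = pvScan ts hc (n + 1) := by
                simp only [pvScan]
                have hck' := hck
                simp [pvCheck] at hck'
                simp [hmemc, hskip, hn3, hck'.1, hck'.2]
              rw [hstep, ih]
              simp only [List.any_cons, List.filter_cons, hname, if_true, List.length_cons]
              have hl : n + 1 + (ts.filter pvIsName).length
                  = n + ((ts.filter pvIsName).length + 1) := by omega
              rw [hl]
              by_cases hlt2 : n < 2
              · have htake : 2 - n = (2 - (n + 1)) + 1 := by omega
                rw [htake]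
                simp [List.take_succ_cons, hck, hmemc]
              · have h0 : 2 - n = 0 := by omega
                have h1 : 2 - (n + 1) = 0 := by omega
                rw [h0, h1]
                simp [hmemc]
            · have hckf : pvCheck t = false := Bool.eq_false_iff.mpr hck
              by_cases hlt2 : n < 2
              · have hLHS : pvScan (t :: ts) hc n = false := by
                  simp only [pvScan]
                  have hckf' := hckf
                  simp [pvCheck] at hckf'
                  simp [hmemc, hskip, hn3, hlt2]
                  intro h' h''
                  exact absurd h'' (by have := hckf' h'; omega)
                rw [hLHS]
                symm
                have htake : 2 - n = (2 - (n + 1)) + 1 := by omega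
                rw [htake]
                simp [hname, List.take_succ_cons, hckf]
              · have hstep : pvScan (t :: ts) hc n = pvScan ts hc (n + 1) := by
                  simp only [pvScan]
                  simp [hmemc, hskip, hn3]
                  omega
                rw [hstep, ih]
                simp only [List.any_cons, List.filter_cons, hname, if_true, List.length_cons]
                have hl : n + 1 + (ts.filter pvIsName).length
                    = n + ((ts.filter pvIsName).length + 1) := by omega
                rw [hl]
                have h0 : 2 - n = 0 := by omega
                have h1 : 2 - (n + 1) = 0 := by omega
                rw [h0, h1]
                simp [hmemc]

-- ===== VERDICT (by name: the statement is the Claim_ definition above) =====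
theorem looks_like_named_detail_url_py_spec : Claim_equal_looks_like_named_detail_url_py := by
  intro tokens _
  show looks_like_named_detail_url_py tokens = looks_like_named_detail_url_py_alt tokens
  unfold looks_like_named_detail_url_py looks_like_named_detail_url_py_alt
  rw [pvScan_char]
  by_cases h3 : tokens.length < 3
  · have hbad : (3 ≤ tokens.length) = False := by simp; omega
    simp [h3, hbad]
  by_cases h6 : tokens.length > 6
  · have hbad : (tokens.length ≤ 6) = False := by simp; omega
    simp [h6, hbad]
  have hA : (decide (tokens.length < 3) || decide (tokens.length > 6)) = false := by
    simp; omega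
  have hB : (!(decide (3 ≤ tokens.length) && decide (tokens.length ≤ 6))) = false := by
    simp; omega
  rw [hA, hB]
  simp only [Bool.false_eq_true, if_false, Nat.zero_add, Nat.sub_zero, Bool.false_or]
  by_cases hctx : (tokens.any fun token => PySem.Set.contains pvCtxTokens token) = true
  · simp only [hctx, Bool.not_true, Bool.false_eq_true, if_false, Bool.true_and]
    have hfil : tokens.filter (fun token =>
        !(PySem.Set.contains pvStopTokens token) && !(PySem.Set.contains pvNegTokens token))
        = tokens.filter pvIsName := rfl
    simp only [hfil]
    by_cases h2 : (tokens.filter pvIsName).length < 2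
    · have hbad : (2 ≤ (tokens.filter pvIsName).length) = False := by simp; omega
      simp [h2, hbad]
    by_cases hc3 : (tokens.filter pvIsName).length > 3
    · have hbad : ((tokens.filter pvIsName).length ≤ 3) = False := by simp; omega
      simp [hc3, hbad]
    have hC : (decide ((tokens.filter pvIsName).length < 2)
        || decide ((tokens.filter pvIsName).length > 3)) = false := by simp; omega
    have hD : (decide (2 ≤ (tokens.filter pvIsName).length)
        && decide ((tokens.filter pvIsName).length ≤ 3)) = true := by simp; omega
    rw [hC, hD]
    simp only [Bool.false_eq_true, if_false, Bool.true_and]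
    have hsl : PySem.List.slice (tokens.filter pvIsName) none (some 2)
        = (tokens.filter pvIsName).take 2 := by
      simp [PySem.List.slice]
    rw [hsl]
    rfl
  · have hctx' : (tokens.any fun token => PySem.Set.contains pvCtxTokens token) = false := by
      simpa using hctx
    rw [hctx']
    simp
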